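-- pv_equiv track=rewrite | github.com/RohitSignIn/IactClass | Ques2.py | op1
-- ===== SOURCE A (Python) =====
-- def op1(a):
--     oddCount = 0
--     for i in range(len(a)):
--         if(a[i] == -1): continue
--         if(oddCount == 0 and a[i]&1):
--             oddCount += 1
--         elif(a[i]&1):
--             a[i] = -1
--             break
--     return a
-- ===== SOURCE B (Python) =====
-- def op1(a):
--     odds = [i for i, x in enumerate(a) if x != -1 and x & 1]
--     if len(odds) >= 2:
--         a[odds[1]] = -1
--     return a
-- ===== Notes on version B (the rewrite author's own statement) =====
-- stated objective: simpler
-- what changed: Instead of A's stateful counter/continue/break scan, B builds the list of indices of odd non-(-1) elements in one enumerate-filter comprehension and marks the second index, if any, with -1.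
import Mathlib
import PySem

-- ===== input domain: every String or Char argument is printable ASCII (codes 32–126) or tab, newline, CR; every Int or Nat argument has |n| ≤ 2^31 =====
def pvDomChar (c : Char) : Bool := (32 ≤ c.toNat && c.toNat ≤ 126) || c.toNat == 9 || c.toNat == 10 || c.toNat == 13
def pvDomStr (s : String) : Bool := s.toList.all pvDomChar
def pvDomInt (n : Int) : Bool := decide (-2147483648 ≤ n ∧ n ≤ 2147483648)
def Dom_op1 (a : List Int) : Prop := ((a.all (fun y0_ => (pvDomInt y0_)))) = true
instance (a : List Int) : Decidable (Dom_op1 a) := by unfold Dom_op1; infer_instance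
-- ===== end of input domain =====

-- B replaces A's stateful counter/continue/break scan by an enumerate-filter comprehension that
-- collects all qualifying indices and marks the second one (objective: simpler);
-- both Pythons mutate the list in place, the equivalence proved is about the returned value.

-- ===== PORT A =====
-- A's for-loop with counter: index i, oddCount, the (possibly updated) list; break returns immediately.
def op1Loop (a : List Int) (i : Nat) (oddCount : Nat) : List Int :=
  if _h : i < a.length then
    if a.getD i 0 = -1 then op1Loop a (i+1) oddCount
    else if oddCount = 0 ∧ (a.getD i 0).land 1 ≠ 0 then op1Loop a (i+1) (oddCount+1)
    else if (a.getD i 0).land 1 ≠ 0 then a.set i (-1)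
    else op1Loop a (i+1) oddCount
  else a
termination_by a.length - i

def op1 (a : List Int) : List Int := op1Loop a 0 0

-- ===== PORT B =====
-- odds = [i for i, x in enumerate(a) if x != -1 and x & 1]
def odds (a : List Int) : List Int :=
  (PySem.List.enumerate a).filterMap
    (fun p => if p.2 ≠ -1 ∧ p.2.land 1 ≠ 0 then some p.1 else none)

-- if len(odds) >= 2: a[odds[1]] = -1 ; indices from enumerate are non-negative, so .toNat is exact
def op1_alt (a : List Int) : List Int :=
  let os := odds a
  if _h : 2 ≤ os.length then a.set (os.getD 1 0).toNat (-1) else a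

-- ===== PRECONDITION & SPEC =====
def Spec_op1 (a : List Int) (out : List Int) : Prop := out = op1_alt a
instance (a : List Int) (out : List Int) : Decidable (Spec_op1 a out) := by unfold Spec_op1; infer_instance

-- ===== CLAIM (what is proved, stated in full; the proofs are below) =====
def Claim_equal_op1 : Prop := ∀ (a : List Int), Dom_op1 a → Spec_op1 a (op1 a)

-- ===== LEMMAS AND PROOFS =====

-- Nat-indexed list of qualifying indices from position i, following A's index recursion.
def idxFrom (a : List Int) (i : Nat) : List Nat :=
  if _h : i < a.length then
    if a.getD i 0 ≠ -1 ∧ (a.getD i 0).land 1 ≠ 0 then i :: idxFrom a (i+1)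
    else idxFrom a (i+1)
  else []
termination_by a.length - i

-- After the first odd has been counted, A's loop marks the head of idxFrom.
theorem op1Loop_one (a : List Int) (i : Nat) :
    op1Loop a i 1 = (match (idxFrom a i).head? with
      | none => a
      | some s => a.set s (-1)) := by
  induction i using idxFrom.induct a with
  | case1 i h hc ih =>
    rw [op1Loop, idxFrom, dif_pos h, dif_pos h, if_neg hc.1,
        if_neg (fun hh => absurd hh.1 one_ne_zero), if_pos hc.2, if_pos hc]
    simp
  | case2 i h hc ih =>
    rw [op1Loop, idxFrom, dif_pos h, dif_pos h]
    by_cases hx : a.getD i 0 = -1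
    · rw [if_pos hx, if_neg hc]; exact ih
    · have ho : ¬ (a.getD i 0).land 1 ≠ 0 := fun ho => hc ⟨hx, ho⟩
      rw [if_neg hx, if_neg (fun hh => ho hh.2), if_neg ho, if_neg hc]; exact ih
  | case3 i h =>
    rw [op1Loop, idxFrom, dif_neg h, dif_neg h]; rfl

-- With oddCount = 0, A's loop marks the second element of idxFrom, if any.
theorem op1Loop_zero (a : List Int) (i : Nat) :
    op1Loop a i 0 = (match (idxFrom a i)[1]? with
      | none => a
      | some s => a.set s (-1)) := by
  induction i using idxFrom.induct a with
  | case1 i h hc ih =>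
    rw [op1Loop, idxFrom, dif_pos h, dif_pos h, if_neg hc.1, if_pos ⟨rfl, hc.2⟩,
        op1Loop_one, if_pos hc]
    simp [List.head?_eq_getElem?]
  | case2 i h hc ih =>
    rw [op1Loop, idxFrom, dif_pos h, dif_pos h]
    by_cases hx : a.getD i 0 = -1
    · rw [if_pos hx, if_neg hc]; exact ih
    · have ho : ¬ (a.getD i 0).land 1 ≠ 0 := fun ho => hc ⟨hx, ho⟩
      rw [if_neg hx, if_neg (fun hh => ho hh.2), if_neg ho, if_neg hc]; exact ih
  | case3 i h =>
    rw [op1Loop, idxFrom, dif_neg h, dif_neg h]; rfl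

-- Structural version of the comprehension, with an Int offset.
def idxList : List Int → Int → List Int
  | [], _ => []
  | x :: xs, s =>
    if x ≠ -1 ∧ x.land 1 ≠ 0 then s :: idxList xs (s+1) else idxList xs (s+1)

theorem enum_filter (l : List Int) (s : Int) :
    (PySem.List.enumerate l s).filterMap
      (fun p => if p.2 ≠ -1 ∧ p.2.land 1 ≠ 0 then some p.1 else none) = idxList l s := by
  induction l generalizing s with
  | nil => simp [idxList, PySem.List.enumerate_nil]
  | cons x xs ih =>
    rw [PySem.List.enumerate_cons, List.filterMap_cons, idxList]
    by_cases hc : x ≠ -1 ∧ x.land 1 ≠ 0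
    · simp only [if_pos hc, ih]
    · simp only [if_neg hc, ih]

-- idxList on the i-suffix is idxFrom with indices cast to Int.
theorem idxList_drop (a : List Int) (i : Nat) :
    idxList (a.drop i) (i : Int) = (idxFrom a i).map Int.ofNat := by
  induction i using idxFrom.induct a with
  | case1 i h hc ih =>
    rw [List.drop_eq_getElem_cons h, idxList, idxFrom, dif_pos h]
    have hg : a.getD i 0 = a[i] := List.getD_eq_getElem a 0 h
    rw [hg] at hc
    rw [if_pos hc]
    rw [hg]  -- align the idxFrom branch condition
    rw [if_pos hc, List.map_cons]
    have : ((i : Int) + 1) = ((i + 1 : Nat) : Int) := by push_cast; ring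
    rw [this, ih]; rfl
  | case2 i h hc ih =>
    rw [List.drop_eq_getElem_cons h, idxList, idxFrom, dif_pos h]
    have hg : a.getD i 0 = a[i] := List.getD_eq_getElem a 0 h
    rw [hg] at hc
    rw [if_neg hc, hg, if_neg hc]
    have : ((i : Int) + 1) = ((i + 1 : Nat) : Int) := by push_cast; ring
    rw [this, ih]
  | case3 i h =>
    have : a.length ≤ i := Nat.le_of_not_lt h
    rw [List.drop_eq_nil_of_le this, idxFrom, dif_neg h]
    rfl

theorem odds_eq (a : List Int) : odds a = (idxFrom a 0).map Int.ofNat := by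
  have := idxList_drop a 0
  simpa [odds, enum_filter] using this

-- ===== VERDICT (by name: the statement is the Claim_ definition above) =====
theorem op1_spec : Claim_equal_op1 := by
  intro a _
  unfold Spec_op1 op1 op1_alt
  rw [op1Loop_zero, odds_eq]
  cases hx : (idxFrom a 0)[1]? with
  | none =>
    have hl : (idxFrom a 0).length ≤ 1 := by
      by_contra hgt
      exact absurd hx (by simp [List.getElem?_eq_getElem (by omega : 1 < (idxFrom a 0).length)])
    simp only []
    rw [dif_neg (by simpa using by omega : ¬ 2 ≤ ((idxFrom a 0).map Int.ofNat).length)]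
  | some s =>
    have hl : 1 < (idxFrom a 0).length := by
      by_contra hle
      have h0 := List.getElem?_eq_none (l := idxFrom a 0) (i := 1) (by omega)
      rw [hx] at h0
      simp at h0
    simp only []
    rw [dif_pos (by simpa using by omega : 2 ≤ ((idxFrom a 0).map Int.ofNat).length)]
    have : ((idxFrom a 0).map Int.ofNat).getD 1 0 = (s : Int) := by
      rw [List.getD_eq_getElem?_getD, List.getElem?_map, hx]; rfl
    rw [this]
    simp
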